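-- pv_equiv track=rewrite | github.com/sellerofair/Python-learning | Bioinformatics Institute. Python Basics/is_parent.py | is_parent
-- ===== SOURCE A (Python) =====
-- def is_parent(tree, node1, node2):
--     result = False
--     if len(tree[node2]) > 0:
--         if node1 in tree[node2]:
--             result = True
--         else:
--             for class3 in tree[node2]:
--                 if is_parent(tree, node1, class3):
--                     result = True
--                     break
--
--     return result
-- ===== SOURCE B (Python) =====
-- def is_parent(tree, node1, node2):
--     # Bellman-Ford-style set relaxation instead of recursion: start from the
--     # direct children of node2 and run len(tree) relaxation passes over the
--     # dict to close the set of strict descendants; then answer by membership.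
--     reached = set(tree[node2])
--     for _ in range(len(tree)):
--         for key, children in tree.items():
--             if key in reached:
--                 reached.update(children)
--     return node1 in reached
-- ===== Notes on version B (the rewrite author's own statement) =====
-- stated objective: alternative
-- what changed: Replaces the depth-first recursion (which re-explores shared subtrees and diverges on cycles) by an iterative Bellman-Ford-style relaxation: len(tree) passes over the dict accumulate the set of strict descendants of node2, then node1 is tested for membership; no recursion, no repeated subtree exploration.
import Mathlib
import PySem

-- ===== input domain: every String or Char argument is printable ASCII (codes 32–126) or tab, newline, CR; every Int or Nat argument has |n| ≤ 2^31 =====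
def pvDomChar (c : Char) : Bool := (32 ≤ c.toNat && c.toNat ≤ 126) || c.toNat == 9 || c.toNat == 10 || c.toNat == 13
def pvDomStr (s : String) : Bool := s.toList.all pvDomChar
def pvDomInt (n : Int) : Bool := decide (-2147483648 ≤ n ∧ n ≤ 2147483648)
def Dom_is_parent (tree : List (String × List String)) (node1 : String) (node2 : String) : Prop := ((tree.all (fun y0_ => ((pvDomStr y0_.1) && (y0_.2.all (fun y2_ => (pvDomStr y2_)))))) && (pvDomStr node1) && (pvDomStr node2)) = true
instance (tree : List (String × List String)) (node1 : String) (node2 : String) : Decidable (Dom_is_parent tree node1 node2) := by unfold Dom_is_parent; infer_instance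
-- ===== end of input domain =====

-- B replaces A's depth-first recursion by an iterative Bellman-Ford-style set
-- relaxation (len(tree) passes closing the descendant set of node2); proved
-- equal to A on every input where A returns (Pre_ below excludes only inputs
-- where the Python A raises KeyError or RecursionError).


-- ===== PORT A =====
-- A's recursion, fuelled by recursion depth.  Fuel tree.length + 1 is enough
-- to find any witness path: a shortest one repeats no key (reach_bound below).
-- 'tree[node2]' is the dict lookup (PySem.Dict.get?); 'none' is Python's
-- KeyError, excluded by Pre_.
def goA (tree : List (String × List String)) (node1 : String) : Nat → String → Bool
  | 0, _ => false                 -- fuel exhausted: unreachable under Pre_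
  | k + 1, node2 =>
    match (PySem.Dict.mk tree).get? node2 with
    | none => false               -- Python raises KeyError here; excluded by Pre_
    | some cs =>
      if cs.length > 0 then
        if cs.contains node1 then true
        else cs.any (fun c => goA tree node1 k c)   -- for … : if rec: True; break
      else false

def is_parent (tree : List (String × List String)) (node1 : String) (node2 : String) : Bool :=
  goA tree node1 (tree.length + 1) node2

-- ===== PORT B =====
-- one pass of 'for key, children in tree.items(): if key in reached: reached.update(children)'
def bPass : List (String × List String) → PySem.Set String → PySem.Set String
  | [], r => r
  | (k, cs) :: rest, r =>
      bPass rest (if PySem.Set.contains r k then PySem.Set.update r cs else r)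

-- 'for _ in range(len(tree)): …' — the counter drives the repetition only
def bLoop (tree : List (String × List String)) : Nat → PySem.Set String → PySem.Set String
  | 0, r => r
  | k + 1, r => bLoop tree k (bPass tree r)

def is_parent_alt (tree : List (String × List String)) (node1 : String) (node2 : String) : Bool :=
  match (PySem.Dict.mk tree).get? node2 with
  | none => false               -- Python raises KeyError here; excluded by Pre_
  | some cs =>
      PySem.Set.contains (bLoop tree tree.length (PySem.Set.ofList cs)) node1

-- ===== PRECONDITION & SPEC =====
-- helpers for Pre_: children of a node, and the reachable closure of a node set
def pvChildren (tree : List (String × List String)) (x : String) : List String :=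
  ((PySem.Dict.mk tree).get? x).getD []
def pvStep (tree : List (String × List String)) (s : List String) : List String :=
  s ++ s.flatMap (fun x => pvChildren tree x)
def pvReachFrom (tree : List (String × List String)) (s : List String) : List String :=
  (pvStep tree)^[tree.length + 1] s

-- pvTFb tree node1 c: the region reachable from c is key-complete, acyclic and
-- node1-free — exactly when A's exploration of c terminates returning False.
def pvTFb (tree : List (String × List String)) (node1 : String) (c : String) : Bool :=
  (pvReachFrom tree [c]).all (fun x =>
    (tree.map Prod.fst).contains x &&
    !((pvReachFrom tree (pvChildren tree x)).contains x) &&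
    !((pvChildren tree x).contains node1))

-- safe edges: x → y when y is a child of x and every earlier sibling of y's
-- first occurrence has a terminating, node1-free subtree (pvTFb); along such
-- edges A's left-to-right DFS reaches y without diverging or raising.
def pvSafeStep (tree : List (String × List String)) (node1 : String) (s : List String) : List String :=
  s ++ s.flatMap (fun x =>
    (pvChildren tree x).filter (fun y =>
      ((pvChildren tree x).takeWhile (fun c => c != y)).all (pvTFb tree node1)))
def pvSafeReach (tree : List (String × List String)) (node1 : String) (s : List String) : List String :=
  (pvSafeStep tree node1)^[tree.length + 1] s

-- Pre_ holds exactly on the inputs where the Python A RETURNS: keys are unique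
-- (true of every Python dict), node2 is a key, and either the whole region
-- reachable from node2 is key-complete and acyclic (A's exploration
-- terminates), or node2 reaches along safe edges a node with node1 among its
-- children (A returns True there before touching any divergent or missing
-- part).  Excluded are exactly the inputs where A raises KeyError (a looked-up
-- node is not a key) or diverges with RecursionError (A's DFS enters a cycle
-- before finding node1).
def Pre_is_parent (tree : List (String × List String)) (node1 : String) (node2 : String) : Prop :=
  (tree.map Prod.fst).Nodup ∧ node2 ∈ tree.map Prod.fst ∧
  ((∀ x ∈ pvReachFrom tree [node2],
      (x ∈ tree.map Prod.fst ∨ x = node1) ∧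
      (x ∈ tree.map Prod.fst → x ∉ pvReachFrom tree (pvChildren tree x))) ∨
    ∃ z ∈ pvSafeReach tree node1 [node2], node1 ∈ pvChildren tree z)
instance (tree : List (String × List String)) (node1 : String) (node2 : String) : Decidable (Pre_is_parent tree node1 node2) := by unfold Pre_is_parent; infer_instance

def pvWitness_is_parent : (List (String × List String)) × String × String :=
  ([("a", ["b", "c"]), ("b", ["c"]), ("c", [])], "c", "a")

def Spec_is_parent (tree : List (String × List String)) (node1 : String) (node2 : String) (out : Bool) : Prop := out = is_parent_alt tree node1 node2
instance (tree : List (String × List String)) (node1 : String) (node2 : String) (out : Bool) : Decidable (Spec_is_parent tree node1 node2 out) := by unfold Spec_is_parent; infer_instance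

-- ===== CLAIM (what is proved, stated in full; the proofs are below) =====
def Claim_equal_is_parent : Prop := ∀ (tree : List (String × List String)) (node1 : String) (node2 : String), Dom_is_parent tree node1 node2 → Pre_is_parent tree node1 node2 → Spec_is_parent tree node1 node2 (is_parent tree node1 node2)

-- ===== LEMMAS AND PROOFS =====

-- ReachN tree k a m: there is a path of k ≥ 1 edges from a to m, every node on
-- it except possibly m being a key of tree.  This is exactly when A answers
-- True for (m, a) given enough fuel, and what B's relaxation computes.
inductive ReachN (tree : List (String × List String)) : Nat → String → String → Prop
  | head {a b : String} {cs : List String} :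
      (PySem.Dict.mk tree).get? a = some cs → b ∈ cs → ReachN tree 1 a b
  | cons {a b m : String} {cs : List String} {k : Nat} :
      (PySem.Dict.mk tree).get? a = some cs → b ∈ cs → ReachN tree k b m →
      ReachN tree (k + 1) a m

theorem goA_sound (tree : List (String × List String)) (node1 : String) :
    ∀ (f : Nat) (a : String), goA tree node1 f a = true → ∃ k, ReachN tree k a node1 := by
  intro f
  induction f with
  | zero => intro a h; simp [goA] at h
  | succ f ih =>
    intro a h
    unfold goA at h
    cases hget : (PySem.Dict.mk tree).get? a with
    | none => rw [hget] at h; simp at h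
    | some cs =>
      rw [hget] at h
      dsimp only at h
      by_cases hlen : cs.length > 0
      · rw [if_pos hlen] at h
        by_cases hc : cs.contains node1
        · exact ⟨1, .head hget (by simpa using hc)⟩
        · rw [if_neg hc, List.any_eq_true] at h
          obtain ⟨c, hcm, hgo⟩ := h
          obtain ⟨k, hk⟩ := ih c hgo
          exact ⟨k + 1, .cons hget hcm hk⟩
      · rw [if_neg hlen] at h; exact absurd h (by simp)

theorem goA_complete (tree : List (String × List String)) (node1 : String)
    {k : Nat} {a : String} (h : ReachN tree k a node1) :
    ∀ f, k ≤ f → goA tree node1 f a = true := by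
  induction h with
  | @head a b cs hget hb =>
    intro f hf
    obtain ⟨f, rfl⟩ : ∃ f', f = f' + 1 := ⟨f - 1, by omega⟩
    unfold goA
    rw [hget]
    dsimp only
    have hlen : cs.length > 0 := List.length_pos_of_mem hb
    rw [if_pos hlen]
    simp only [List.contains_iff_mem, List.any_eq_true, decide_eq_true_eq, Bool.if_true_left,
      Bool.or_eq_true, decide_eq_true_eq]
    exact Or.inl hb
  | @cons a b m cs k hget hb _ ih =>
    intro f hf
    obtain ⟨f, rfl⟩ : ∃ f', f = f' + 1 := ⟨f - 1, by omega⟩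
    unfold goA
    rw [hget]
    dsimp only
    have hlen : cs.length > 0 := List.length_pos_of_mem hb
    rw [if_pos hlen]
    by_cases hc : cs.contains m
    · simp only [List.contains_iff_mem, List.any_eq_true, Bool.if_true_left, Bool.or_eq_true,
        decide_eq_true_eq]
      exact Or.inl (by simpa using hc)
    · rw [if_neg hc, List.any_eq_true]
      exact ⟨b, hb, ih f (by omega)⟩

theorem bPass_subset (l : List (String × List String)) :
    ∀ (r : PySem.Set String) (x : String), x ∈ r → x ∈ bPass l r := by
  induction l with
  | nil => intro r x hx; simpa [bPass] using hx
  | cons p rest ih =>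
    intro r x hx
    obtain ⟨k, cs⟩ := p
    unfold bPass
    apply ih
    split
    · exact (PySem.Set.mem_update _ _ _).mpr (Or.inl hx)
    · exact hx

theorem bPass_anchor (l : List (String × List String)) {a : String} {cs : List String} :
    ∀ (r : PySem.Set String), (a, cs) ∈ l → a ∈ r → ∀ c ∈ cs, c ∈ bPass l r := by
  induction l with
  | nil => intro r h; simp at h
  | cons p rest ih =>
    intro r hmem hanchor c hc
    obtain ⟨k0, cs0⟩ := p
    unfold bPass
    rcases List.mem_cons.mp hmem with heq | htail
    · obtain ⟨rfl, rfl⟩ := Prod.mk.injEq .. ▸ heq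
      rw [if_pos ((PySem.Set.contains_iff r a).mpr hanchor)]
      exact bPass_subset rest _ c ((PySem.Set.mem_update _ _ _).mpr (Or.inr hc))
    · apply ih _ htail _ c hc
      split
      · exact (PySem.Set.mem_update _ _ _).mpr (Or.inl hanchor)
      · exact hanchor

theorem bLoop_subset (tree : List (String × List String)) :
    ∀ (f : Nat) (r : PySem.Set String) (x : String), x ∈ r → x ∈ bLoop tree f r := by
  intro f
  induction f with
  | zero => intro r x hx; simpa [bLoop] using hx
  | succ f ih =>
    intro r x hx
    unfold bLoop
    exact ih _ x (bPass_subset tree r x hx)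

theorem reach_snoc (tree : List (String × List String)) {k : Nat} {n2 a : String}
    (h : ReachN tree k n2 a) :
    ∀ {cs : List String} {c : String}, (PySem.Dict.mk tree).get? a = some cs → c ∈ cs →
      ReachN tree (k + 1) n2 c := by
  induction h with
  | @head a b cs hget hb =>
    intro cs' c hget' hc
    exact .cons hget hb (.head hget' hc)
  | @cons a b m cs k hget hb _ ih =>
    intro cs' c hget' hc
    exact .cons hget hb (ih hget' hc)

theorem bPass_sound (tree : List (String × List String)) (node2 : String)
    (hnd : (tree.map Prod.fst).Nodup)
    (l : List (String × List String)) (hl : ∀ p ∈ l, p ∈ tree) :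
    ∀ (r : PySem.Set String), (∀ x ∈ r, ∃ k, ReachN tree k node2 x) →
      ∀ x ∈ bPass l r, ∃ k, ReachN tree k node2 x := by
  induction l with
  | nil => intro r hr x hx; exact hr x (by simpa [bPass] using hx)
  | cons p rest ih =>
    intro r hr x hx
    obtain ⟨k0, cs0⟩ := p
    have hp0 : (k0, cs0) ∈ tree := hl _ List.mem_cons_self
    have hget0 : (PySem.Dict.mk tree).get? k0 = some cs0 :=
      PySem.Dict.get?_of_mem_items _ hp0 (by simpa [PySem.Dict.keys] using hnd)
    unfold bPass at hx
    refine ih (fun p hp => hl p (List.mem_cons_of_mem _ hp)) _ ?_ x hx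
    intro y hy
    split at hy
    · rcases (PySem.Set.mem_update _ _ _).mp hy with hold | hnew
      · exact hr y hold
      · rename_i hcond
        obtain ⟨k, hk⟩ := hr k0 ((PySem.Set.contains_iff _ _).mp hcond)
        exact ⟨k + 1, reach_snoc tree hk hget0 hnew⟩
    · exact hr y hy

theorem bLoop_sound (tree : List (String × List String)) (node2 : String)
    (hnd : (tree.map Prod.fst).Nodup) :
    ∀ (f : Nat) (r : PySem.Set String), (∀ x ∈ r, ∃ k, ReachN tree k node2 x) →
      ∀ x ∈ bLoop tree f r, ∃ k, ReachN tree k node2 x := by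
  intro f
  induction f with
  | zero => intro r hr x hx; exact hr x (by simpa [bLoop] using hx)
  | succ f ih =>
    intro r hr x hx
    unfold bLoop at hx
    exact ih _ (bPass_sound tree node2 hnd tree (fun p hp => hp) r hr) x hx

theorem bComplete (tree : List (String × List String))
    {k : Nat} {a m : String} (h : ReachN tree k a m) :
    ∀ (f : Nat) (r : PySem.Set String), k ≤ f → a ∈ r → m ∈ bLoop tree f r := by
  induction h with
  | @head a b cs hget hb =>
    intro f r hf ha
    obtain ⟨f, rfl⟩ : ∃ f', f = f' + 1 := ⟨f - 1, by omega⟩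
    unfold bLoop
    have hmem : (a, cs) ∈ tree := PySem.Dict.mem_items_of_get?_eq_some _ hget
    exact bLoop_subset tree f _ b (bPass_anchor tree r hmem ha b hb)
  | @cons a b m cs k hget hb _ ih =>
    intro f r hf ha
    obtain ⟨f, rfl⟩ : ∃ f', f = f' + 1 := ⟨f - 1, by omega⟩
    unfold bLoop
    have hmem : (a, cs) ∈ tree := PySem.Dict.mem_items_of_get?_eq_some _ hget
    exact ih f _ (by omega) (bPass_anchor tree r hmem ha b hb)

-- anchor-list form of ReachN, used to shorten a path to one without repeated
-- anchors: the anchors are keys, so a repetition-free path has at most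
-- tree.length edges.
inductive ReachL (tree : List (String × List String)) : List String → String → String → Prop
  | head {a b : String} {cs : List String} :
      (PySem.Dict.mk tree).get? a = some cs → b ∈ cs → ReachL tree [a] a b
  | cons {a b m : String} {cs : List String} {l : List String} :
      (PySem.Dict.mk tree).get? a = some cs → b ∈ cs → ReachL tree l b m →
      ReachL tree (a :: l) a m

theorem reachL_of_reachN (tree : List (String × List String)) {k : Nat} {a m : String}
    (h : ReachN tree k a m) : ∃ l, ReachL tree l a m ∧ l.length = k := by
  induction h with
  | @head a b cs hget hb => exact ⟨[a], .head hget hb, rfl⟩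
  | @cons a b m cs k hget hb _ ih =>
    obtain ⟨l, hl, hlen⟩ := ih
    exact ⟨a :: l, .cons hget hb hl, by simp [hlen]⟩

theorem reachN_of_reachL (tree : List (String × List String)) {l : List String} {a m : String}
    (h : ReachL tree l a m) : ReachN tree l.length a m := by
  induction h with
  | @head a b cs hget hb => exact .head hget hb
  | @cons a b m cs l hget hb _ ih => exact .cons hget hb ih

theorem reachL_anchors (tree : List (String × List String)) {l : List String} {a m : String}
    (h : ReachL tree l a m) : ∀ x ∈ l, x ∈ tree.map Prod.fst := by
  induction h with
  | @head a b cs hget hb =>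
    intro x hx
    rw [List.mem_singleton] at hx
    subst hx
    exact List.mem_map_of_mem (PySem.Dict.mem_items_of_get?_eq_some _ hget)
  | @cons a b m cs l hget hb _ ih =>
    intro x hx
    rcases List.mem_cons.mp hx with rfl | hx
    · exact List.mem_map_of_mem (PySem.Dict.mem_items_of_get?_eq_some _ hget)
    · exact ih x hx

theorem reachL_suffix (tree : List (String × List String)) {l : List String} {a m : String}
    (h : ReachL tree l a m) : ∀ x ∈ l, ∃ l₂, ReachL tree l₂ x m ∧ l₂.length ≤ l.length := by
  induction h with
  | @head a b cs hget hb =>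
    intro x hx
    rw [List.mem_singleton] at hx
    subst hx
    exact ⟨[x], .head hget hb, le_refl _⟩
  | @cons a b m cs l hget hb htail ih =>
    intro x hx
    rcases List.mem_cons.mp hx with rfl | hx
    · exact ⟨x :: l, .cons hget hb htail, le_refl _⟩
    · obtain ⟨l₂, hl₂, hlen⟩ := ih x hx
      exact ⟨l₂, hl₂, by simpa using Nat.le_succ_of_le hlen⟩

theorem reachL_dedup (tree : List (String × List String)) :
    ∀ (n : Nat) (l : List String) (a m : String), l.length ≤ n → ReachL tree l a m →
      ∃ l', ReachL tree l' a m ∧ l'.Nodup ∧ l'.length ≤ l.length := by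
  intro n
  induction n with
  | zero => intro l a m hlen h; cases h <;> simp at hlen
  | succ n ih =>
    intro l a m hlen h
    cases h with
    | @head _ _ cs hget hb => exact ⟨[a], .head hget hb, by simp, le_refl _⟩
    | @cons _ b _ cs l₀ hget hb htail =>
      have hlen0 : l₀.length ≤ n := by simpa using hlen
      obtain ⟨l', hl', hnd', hlen'⟩ := ih l₀ b m hlen0 htail
      by_cases ha : a ∈ l'
      · obtain ⟨l₂, hl₂, hlen₂⟩ := reachL_suffix tree hl' a ha
        obtain ⟨l₂', hl₂', hnd₂', hlen₂'⟩ := ih l₂ a m (by omega) hl₂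
        refine ⟨l₂', hl₂', hnd₂', ?_⟩
        simp only [List.length_cons]
        omega
      · exact ⟨a :: l', .cons hget hb hl', List.nodup_cons.mpr ⟨ha, hnd'⟩, by simpa using hlen'⟩

theorem reach_bound (tree : List (String × List String)) {k : Nat} {a m : String}
    (h : ReachN tree k a m) : ∃ k', k' ≤ tree.length ∧ ReachN tree k' a m := by
  obtain ⟨l, hl, rfl⟩ := reachL_of_reachN tree h
  obtain ⟨l', hl', hnd', _⟩ := reachL_dedup tree l.length l a m (le_refl _) hl
  refine ⟨l'.length, ?_, reachN_of_reachL tree hl'⟩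
  have hsub : l' ⊆ tree.map Prod.fst := fun x hx => reachL_anchors tree hl' x hx
  have := List.Subperm.length_le (List.subperm_of_subset hnd' hsub)
  simpa using this

-- ===== VERDICT (by name: the statement is the Claim_ definition above) =====
theorem is_parent_spec : Claim_equal_is_parent := by
  intro tree node1 node2 _ hpre
  obtain ⟨hnd, hmem, -⟩ := hpre
  show is_parent tree node1 node2 = is_parent_alt tree node1 node2
  have hiffA : is_parent tree node1 node2 = true ↔ ∃ k, ReachN tree k node2 node1 := by
    constructor
    · exact goA_sound tree node1 _ node2
    · rintro ⟨k, hk⟩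
      obtain ⟨k', hk'le, hk'⟩ := reach_bound tree hk
      exact goA_complete tree node1 hk' _ (by omega)
  have hiffB : is_parent_alt tree node1 node2 = true ↔ ∃ k, ReachN tree k node2 node1 := by
    have hsome : ((PySem.Dict.mk tree).get? node2).isSome := by
      rw [← PySem.Dict.contains_eq_isSome_get?]
      exact (PySem.Dict.contains_iff_mem_keys _ _).mpr (by simpa [PySem.Dict.keys] using hmem)
    obtain ⟨cs0, hget0⟩ := Option.isSome_iff_exists.mp hsome
    unfold is_parent_alt
    rw [hget0]
    constructor
    · intro h
      have hx : node1 ∈ bLoop tree tree.length (PySem.Set.ofList cs0) :=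
        (PySem.Set.contains_iff _ _).mp h
      refine bLoop_sound tree node2 hnd _ _ ?_ _ hx
      intro x hxm
      exact ⟨1, .head hget0 ((PySem.Set.mem_ofList _ _).mp hxm)⟩
    · rintro ⟨k, hk⟩
      obtain ⟨k', hk'le, hk'⟩ := reach_bound tree hk
      refine (PySem.Set.contains_iff _ _).mpr ?_
      cases hk' with
      | @head a b cs hget hb =>
        rw [hget0] at hget
        cases hget
        exact bLoop_subset tree _ _ _ ((PySem.Set.mem_ofList _ _).mpr hb)
      | @cons a b m cs k'' hget hb htail =>
        rw [hget0] at hget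
        cases hget
        exact bComplete tree htail _ _ (by omega) ((PySem.Set.mem_ofList _ _).mpr hb)
  cases hA : is_parent tree node1 node2 <;> cases hB : is_parent_alt tree node1 node2 <;> simp_all
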